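-- pv_equiv track=rewrite | github.com/Sebi23647/networking-algorithms-exercises | ServerCrypto/ServerCrypto/ServerCrypto.py | pad_message
-- ===== SOURCE A (Python) =====
-- def pad_message(message, key_length):
--
--     alphabet = 'abcdefghijklmnopqrstuvwxyz'
--     pad_len = (key_length - len(message) % key_length) % key_length
--     pad_chars = ""
--     i = 0
--     while len(pad_chars) < pad_len:
--         pad_chars += alphabet[i % len(alphabet)]
--         i += 1
--     return message + pad_chars
-- ===== SOURCE B (Python) =====
-- def pad_message(message, key_length):
--     alphabet = 'abcdefghijklmnopqrstuvwxyz'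
--     pad_len = (key_length - len(message) % key_length) % key_length
--     return message + (alphabet * (pad_len // 26 + 1))[:pad_len]
-- ===== Notes on version B (the rewrite author's own statement) =====
-- stated objective: simpler
-- what changed: Replaced the character-by-character while loop with a cyclic index by a closed-form repeat-and-slice of the alphabet: (alphabet * (pad_len // 26 + 1))[:pad_len].
import Mathlib
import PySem

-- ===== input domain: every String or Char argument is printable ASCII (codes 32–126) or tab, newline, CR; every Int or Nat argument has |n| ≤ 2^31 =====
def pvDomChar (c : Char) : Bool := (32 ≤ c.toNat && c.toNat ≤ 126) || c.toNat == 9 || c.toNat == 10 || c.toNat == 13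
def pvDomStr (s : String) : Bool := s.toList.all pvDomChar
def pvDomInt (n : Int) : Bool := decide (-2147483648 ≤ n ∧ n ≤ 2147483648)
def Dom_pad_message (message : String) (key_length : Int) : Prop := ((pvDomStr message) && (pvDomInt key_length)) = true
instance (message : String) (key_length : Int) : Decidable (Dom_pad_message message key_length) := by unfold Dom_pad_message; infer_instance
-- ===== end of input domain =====

-- B replaces A's while loop (cyclic index, char-by-char append) with a closed-form
-- repeat-and-slice of the alphabet; equal return values wherever A returns (key_length ≠ 0).

-- ===== PORT A =====
def pvAlpha : List Char := "abcdefghijklmnopqrstuvwxyz".toList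

-- the while loop of A; alphabet[i % 26] is always in range, so getD's default is unreachable
def padLoopA (pad_len : Int) (pad_chars : List Char) (i : Nat) : List Char :=
  if (pad_chars.length : Int) < pad_len then
    padLoopA pad_len (pad_chars ++ [pvAlpha.getD (i % 26) ' ']) (i + 1)
  else pad_chars
termination_by (pad_len - pad_chars.length).toNat
decreasing_by simp; omega

def pad_message (message : String) (key_length : Int) : String :=
  let pad_len := PySem.Int.mod (key_length - PySem.Int.mod (message.toList.length : Int) key_length) key_length
  String.ofList (message.toList ++ padLoopA pad_len [] 0)

-- ===== PORT B =====
def pad_message_alt (message : String) (key_length : Int) : String :=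
  let pad_len := PySem.Int.mod (key_length - PySem.Int.mod (message.toList.length : Int) key_length) key_length
  let pad_chars := PySem.List.slice (PySem.List.pyRepeat pvAlpha (PySem.Int.floordiv pad_len 26 + 1)) none (some pad_len)
  String.ofList (message.toList ++ pad_chars)

-- ===== PRECONDITION & SPEC =====
-- A raises ZeroDivisionError exactly when key_length = 0 (so does B); excluded.
def Pre_pad_message (message : String) (key_length : Int) : Prop := key_length ≠ 0
instance (message : String) (key_length : Int) : Decidable (Pre_pad_message message key_length) := by unfold Pre_pad_message; infer_instance
def pvWitness_pad_message : String × Int := ("hello", 4)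

def Spec_pad_message (message : String) (key_length : Int) (out : String) : Prop := out = pad_message_alt message key_length
instance (message : String) (key_length : Int) (out : String) : Decidable (Spec_pad_message message key_length out) := by unfold Spec_pad_message; infer_instance

-- ===== CLAIM (what is proved, stated in full; the proofs are below) =====
def Claim_equal_pad_message : Prop := ∀ (message : String) (key_length : Int), Dom_pad_message message key_length → Pre_pad_message message key_length → Spec_pad_message message key_length (pad_message message key_length)

-- ===== LEMMAS AND PROOFS =====

-- the cyclic character stream both sides produce
def pvCyc : Nat → Nat → List Char
  | 0, _ => []
  | n + 1, i => pvAlpha.getD (i % 26) ' ' :: pvCyc n (i + 1)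

theorem pvCyc_shift (n : Nat) : ∀ i, pvCyc n (i + 26) = pvCyc n i := by
  induction n with
  | zero => intro i; rfl
  | succ n ih =>
      intro i
      simp [pvCyc, Nat.add_right_comm i 26 1, ih, Nat.add_mod_right]

theorem pvCyc_add : ∀ (a b i : Nat), pvCyc (a + b) i = pvCyc a i ++ pvCyc b (i + a) := by
  intro a
  induction a with
  | zero => intro b i; simp [pvCyc]
  | succ a iha =>
      intro b i
      rw [show a + 1 + b = (a + b) + 1 by omega]
      simp only [pvCyc, iha b (i + 1), Nat.add_right_comm i 1 a, Nat.add_assoc]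
      simp

theorem pvCyc_small : ∀ m < 27, ∀ i < 27, i + m ≤ 26 → pvCyc m i = (pvAlpha.drop i).take m := by
  decide

theorem padLoopA_eq : ∀ (n : Nat) (pad_len : Int) (acc : List Char) (i : Nat),
    (pad_len - acc.length).toNat = n → padLoopA pad_len acc i = acc ++ pvCyc n i := by
  intro n
  induction n with
  | zero =>
      intro pad_len acc i h
      rw [padLoopA]
      have : ¬ ((acc.length : Int) < pad_len) := by omega
      simp [this, pvCyc]
  | succ n ih =>
      intro pad_len acc i h
      rw [padLoopA]
      have hlt : (acc.length : Int) < pad_len := by omega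
      have h' : (pad_len - ((acc ++ [pvAlpha.getD (i % 26) ' ']).length : Int)).toNat = n := by
        simp; omega
      simp only [hlt, if_pos, ih pad_len _ (i + 1) h', pvCyc]
      simp

theorem takeRep : ∀ (q m : Nat), m ≤ 26 * q →
    (PySem.List.pyRepeat pvAlpha (q : Int)).take m = pvCyc m 0 := by
  intro q
  induction q with
  | zero =>
      intro m hm
      interval_cases m
      rfl
  | succ q ih =>
      intro m hm
      have hrep : PySem.List.pyRepeat pvAlpha ((q + 1 : Nat) : Int)
          = pvAlpha ++ PySem.List.pyRepeat pvAlpha (q : Int) := by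
        simp [PySem.List.pyRepeat]
        rfl
      rw [hrep, List.take_append]
      have hlen : pvAlpha.length = 26 := by decide
      by_cases hc : m ≤ 26
      · have h1 : pvAlpha.take m = pvCyc m 0 := by
          rw [pvCyc_small m (by omega) 0 (by omega) (by omega)]
          simp
        have h2 : m - pvAlpha.length = 0 := by omega
        simp [h1, h2]
      · have h1 : pvAlpha.take m = pvAlpha := List.take_of_length_le (by omega)
        have h2 : m - pvAlpha.length = m - 26 := by omega
        have h3 : (PySem.List.pyRepeat pvAlpha (q : Int)).take (m - 26) = pvCyc (m - 26) 0 :=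
          ih (m - 26) (by omega)
        have hsplit : pvCyc m 0 = pvCyc 26 0 ++ pvCyc (m - 26) 26 := by
          conv_lhs => rw [show m = 26 + (m - 26) by omega]
          simpa using pvCyc_add 26 (m - 26) 0
        have h26 : pvCyc 26 0 = pvAlpha := by decide
        rw [h1, h2, h3, hsplit, h26, pvCyc_shift]

theorem pyRepeat_nonpos (n : Int) (hn : n ≤ 0) : PySem.List.pyRepeat pvAlpha n = [] := by
  simp [PySem.List.pyRepeat]
  omega

-- ===== VERDICT (by name: the statement is the Claim_ definition above) =====
theorem pad_message_spec : Claim_equal_pad_message := by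
  intro message key_length _ hk
  simp only [Spec_pad_message, pad_message, pad_message_alt]
  set pad_len := PySem.Int.mod (key_length - PySem.Int.mod (message.toList.length : Int) key_length) key_length with hpl
  congr 1
  by_cases hpos : 0 ≤ pad_len
  · -- pad_len ≥ 0: both produce pvCyc pad_len.toNat 0
    have hA : padLoopA pad_len [] 0 = pvCyc pad_len.toNat 0 := by
      have := padLoopA_eq pad_len.toNat pad_len [] 0 (by simp)
      simpa using this
    have hq : 0 ≤ PySem.Int.floordiv pad_len 26 + 1 := by
      have := PySem.Int.le_floordiv_iff_mul_le (a := pad_len) (b := (26 : Int)) (q := 0) (by omega)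
      omega
    set q := (PySem.Int.floordiv pad_len 26 + 1).toNat with hqdef
    have hcast : ((q : Nat) : Int) = PySem.Int.floordiv pad_len 26 + 1 := by omega
    have hbound : pad_len.toNat ≤ 26 * q := by
      have := PySem.Int.floordiv_lt_iff_lt_mul (a := pad_len) (b := (26 : Int))
        (q := PySem.Int.floordiv pad_len 26 + 1) (by omega)
      omega
    have hB : PySem.List.slice (PySem.List.pyRepeat pvAlpha (PySem.Int.floordiv pad_len 26 + 1)) none (some pad_len)
        = pvCyc pad_len.toNat 0 := by
      rw [← hcast, PySem.List.slice_to _ hpos, takeRep q pad_len.toNat hbound]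
    rw [hA, hB]
  · -- pad_len < 0: A's loop never runs, B repeats the alphabet a nonpositive number of times
    have hA : padLoopA pad_len [] 0 = [] := by
      rw [padLoopA]
      have : ¬ (((List.length ([] : List Char)) : Int) < pad_len) := by simp; omega
      simp at this ⊢
      omega
    have hq : PySem.Int.floordiv pad_len 26 + 1 ≤ 0 := by
      have := PySem.Int.floordiv_lt_iff_lt_mul (a := pad_len) (b := (26 : Int)) (q := 0) (by omega)
      omega
    rw [hA, pyRepeat_nonpos _ hq]
    simp [PySem.List.slice]
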